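-- pv_equiv track=rewrite | github.com/acgis-sun00163/gis4107-day07 | VickySandIsabelleFO/phone_utils.py | phone_number_has_letter
-- ===== SOURCE A (Python) =====
-- def phone_number_has_letter(phone_number):
--     if len(phone_number) !=12:
--         return False
--     for i in range(12):
--         if i in [3,7]:
--             if phone_number[i] != '-':
--                 return False
--         if i in [0,1,2]:
--             if not phone_number[i].isdigit():
--                 return False
--         if i in [4,5,6,8,9,10,11]:
--             if not phone_number[i].isalnum():
--                 return False
--     return True
-- ===== SOURCE B (Python) =====
-- def phone_number_has_letter(phone_number):
--     if len(phone_number) != 12: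
--         return False
--     return (phone_number[3] == '-' and phone_number[7] == '-'
--             and phone_number[:3].isdigit()
--             and phone_number[4:7].isalnum()
--             and phone_number[8:].isalnum())
-- ===== Notes on version B (the rewrite author's own statement) =====
-- stated objective: simpler
-- what changed: Replaced the 12-iteration index loop with per-position list-membership tests by a single boolean expression: dash checks at indices 3 and 7, an isdigit check on the first three-character slice, and isalnum checks on the two remaining slices.
import Mathlib
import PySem

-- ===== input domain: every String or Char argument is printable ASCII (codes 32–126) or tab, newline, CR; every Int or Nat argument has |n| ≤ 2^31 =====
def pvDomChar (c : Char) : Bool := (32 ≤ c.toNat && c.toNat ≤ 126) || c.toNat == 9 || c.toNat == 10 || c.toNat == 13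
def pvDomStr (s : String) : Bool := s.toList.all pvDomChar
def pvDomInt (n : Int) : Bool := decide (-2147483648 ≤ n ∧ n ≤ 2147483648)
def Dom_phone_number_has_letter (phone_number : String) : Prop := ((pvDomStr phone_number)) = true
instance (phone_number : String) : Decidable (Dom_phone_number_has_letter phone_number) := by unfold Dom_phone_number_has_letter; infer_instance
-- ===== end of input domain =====

-- B replaces A's 12-iteration index loop by one conjunction of slice/index checks (objective: simpler).

-- ===== PORT A =====
-- phone_number[i] for i drawn from range(12) after the len==12 guard: the none
-- (IndexError) case of pyGet? is unreachable there, defaulted to NUL.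
def pvCharAt (cs : List Char) (i : Int) : Char := (PySem.List.pyGet? cs i).getD '\x00'

-- the 'for i in range(12)' loop with its early returns, one iteration per index
def pvLoopA (cs : List Char) : List Int → Bool
  | [] => true
  | i :: rest =>
    if (i = 3 ∨ i = 7) ∧ ¬ (pvCharAt cs i == '-') then false
    else if (i = 0 ∨ i = 1 ∨ i = 2) ∧ ¬ PySem.Chars.isdigit (pvCharAt cs i) then false
    else if (i = 4 ∨ i = 5 ∨ i = 6 ∨ i = 8 ∨ i = 9 ∨ i = 10 ∨ i = 11) ∧ ¬ PySem.Chars.isalnum (pvCharAt cs i) then false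
    else pvLoopA cs rest

def phone_number_has_letter (phone_number : String) : Bool :=
  let cs := phone_number.toList
  if cs.length ≠ 12 then false
  else pvLoopA cs (PySem.List.pyRange 0 12 1)

-- ===== PORT B =====
def phone_number_has_letter_alt (phone_number : String) : Bool :=
  let cs := phone_number.toList
  if cs.length ≠ 12 then false
  else
    ((PySem.List.pyGet? cs 3).getD '\x00' == '-') &&
    ((PySem.List.pyGet? cs 7).getD '\x00' == '-') &&
    PySem.Chars.strIsdigit (PySem.List.slice cs none (some 3)) &&
    PySem.Chars.strIsalnum (PySem.List.slice cs (some 4) (some 7)) &&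
    PySem.Chars.strIsalnum (PySem.List.slice cs (some 8) none)

-- ===== PRECONDITION & SPEC =====
def Spec_phone_number_has_letter (phone_number : String) (out : Bool) : Prop := out = phone_number_has_letter_alt phone_number
instance (phone_number : String) (out : Bool) : Decidable (Spec_phone_number_has_letter phone_number out) := by unfold Spec_phone_number_has_letter; infer_instance

-- ===== CLAIM (what is proved, stated in full; the proofs are below) =====
def Claim_equal_phone_number_has_letter : Prop := ∀ (phone_number : String), Dom_phone_number_has_letter phone_number → Spec_phone_number_has_letter phone_number (phone_number_has_letter phone_number)

-- ===== LEMMAS AND PROOFS =====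
-- on any 12-char list, A's unrolled loop equals B's conjunction of slice checks
set_option maxHeartbeats 1000000 in
theorem pv_key (cs : List Char) (h : cs.length = 12) :
    pvLoopA cs (PySem.List.pyRange 0 12 1) =
      (((PySem.List.pyGet? cs 3).getD '\x00' == '-') &&
       ((PySem.List.pyGet? cs 7).getD '\x00' == '-') &&
       PySem.Chars.strIsdigit (PySem.List.slice cs none (some 3)) &&
       PySem.Chars.strIsalnum (PySem.List.slice cs (some 4) (some 7)) &&
       PySem.Chars.strIsalnum (PySem.List.slice cs (some 8) none)) := by
  have hr : PySem.List.pyRange 0 12 1 = [0,1,2,3,4,5,6,7,8,9,10,11] := by decide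
  match cs, h with
  | [a,b,c,d,e,f,g,h',i,j,k,l], _ =>
    rw [hr]
    simp [pvLoopA, pvCharAt, PySem.List.pyGet?, PySem.List.pyIdx?,
      PySem.List.slice, PySem.Chars.strIsdigit, PySem.Chars.strIsalnum,
      Bool.if_false_right, Bool.if_true_right, ← Bool.and_assoc]
    ac_rfl

-- ===== VERDICT (by name: the statement is the Claim_ definition above) =====
theorem phone_number_has_letter_spec : Claim_equal_phone_number_has_letter := by
  intro s _
  unfold Spec_phone_number_has_letter phone_number_has_letter phone_number_has_letter_alt
  dsimp only
  split_ifs with h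
  · rfl
  · exact pv_key s.toList (not_ne_iff.mp h)
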